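-- pv_equiv track=rewrite | github.com/lun-ai/sequential-teaching | data/analysis/sort_algorithms.py | dict_sort_front
-- ===== SOURCE A (Python) =====
-- def dict_sort_front(x):
--     '''
--     Applies insertion sort by prioritising comparison with the first element of the partially sorted list
--
--     Tested
--
--     PARAMETERS
--     ----------
--     x : list
--
--     RETURNS
--     -------
--     list : [sorted list, comps, compsN]
--     '''
--
--     result = []
--     comps = []
--     compsN = 0
--
--     for n in x:
--         if result == []:
--             result.append(n)
--             continue
--         i = 0
--         j = len(result) - 1
--
--         if n > result[j]:
--             comps.append([n, result[j]])
--             compsN += 1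
--             result.insert(j + 1, n)
--         elif n < result[i]:
--             comps.append([n, result[i]])
--             compsN += 1
--             result.insert(i, n)
--         else:
--             comps.append([n, result[i]])
--             comps.append([n, result[j]])
--             compsN += 2
--             while i < j:
--                 k = (i + j) // 2
--                 if n < result[k]:
--                     comps.append([n, result[k]])
--                     compsN += 1
--                     j = k
--                 else:
--                     comps.append([n, result[k]])
--                     compsN += 1
--                     i = k
--                 if i >= j - 1:
--                     result.insert(j, n)
--                     break
--
--     return result, comps, compsN
-- ===== SOURCE B (Python) =====
-- def _select(counts, k):
--     # value of the k-th element (0-based) of the sorted multiset held by counts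
--     acc = 0
--     for v, c in counts:
--         acc += c
--         if k < acc:
--             return v
--     return 0  # unreachable for k in range
--
--
-- def _add(counts, n):
--     # return a new count list with one more copy of n, keys kept strictly increasing
--     out = []
--     idx = 0
--     while idx < len(counts) and counts[idx][0] < n:
--         out.append(counts[idx])
--         idx += 1
--     if idx < len(counts) and counts[idx][0] == n:
--         out.append((n, counts[idx][1] + 1))
--         idx += 1
--     else:
--         out.append((n, 1))
--     out.extend(counts[idx:])
--     return out
--
--
-- def dict_sort_front(x):
--     counts = []   # sorted run-length encoding (value, multiplicity) of the partial result
--     size = 0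
--     comps = []
--     compsN = 0
--
--     for n in x:
--         if size == 0:
--             counts = _add(counts, n)
--             size = 1
--             continue
--         i = 0
--         j = size - 1
--         first = _select(counts, 0)
--         last = _select(counts, j)
--
--         if n > last:
--             comps.append([n, last])
--             compsN += 1
--             counts = _add(counts, n)
--             size += 1
--         elif n < first:
--             comps.append([n, first])
--             compsN += 1
--             counts = _add(counts, n)
--             size += 1
--         else:
--             comps.append([n, first])
--             comps.append([n, last])
--             compsN += 2
--             while i < j:
--                 k = (i + j) // 2
--                 rk = _select(counts, k)
--                 comps.append([n, rk])
--                 compsN += 1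
--                 if n < rk:
--                     j = k
--                 else:
--                     i = k
--                 if i >= j - 1:
--                     counts = _add(counts, n)
--                     size += 1
--                     break
--
--     result = []
--     for v, c in counts:
--         result.extend([v] * c)
--     return result, comps, compsN
-- ===== Notes on version B (the rewrite author's own statement) =====
-- stated objective: alternative
-- what changed: B replaces A's flat sorted list (O(n) list.insert and direct indexing) by a sorted run-length encoding (value,count): rank access walks the counts and insertion bumps a count, while replaying the identical comparison trace.
import Mathlib
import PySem

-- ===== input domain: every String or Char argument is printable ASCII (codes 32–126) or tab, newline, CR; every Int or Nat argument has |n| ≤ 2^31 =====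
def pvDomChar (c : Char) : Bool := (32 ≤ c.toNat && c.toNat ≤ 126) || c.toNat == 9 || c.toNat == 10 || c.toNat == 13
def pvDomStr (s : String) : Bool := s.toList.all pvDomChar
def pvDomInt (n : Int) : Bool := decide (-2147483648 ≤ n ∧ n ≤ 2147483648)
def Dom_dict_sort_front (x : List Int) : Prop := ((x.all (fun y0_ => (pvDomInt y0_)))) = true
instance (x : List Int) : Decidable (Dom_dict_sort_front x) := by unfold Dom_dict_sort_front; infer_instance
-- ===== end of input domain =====

-- B replaces A's flat sorted list (with O(n) list.insert and direct indexing) by a sorted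
-- run-length encoding (value, multiplicity): rank access walks the counts, insertion bumps a
-- count; the comparison trace replayed is identical. Objective: alternative (not measurably faster).

-- ===== PORT A =====
-- the inner 'while i < j' loop; fuel (j - i + 1) bounds the iterations, loop state is (result, i, j, comps, compsN)
def pvWhileA (n : Int) : Nat → List Int → Int → Int → List (List Int) → Int → List Int × List (List Int) × Int
  | 0, result, _, _, comps, compsN => (result, comps, compsN)
  | fuel + 1, result, i, j, comps, compsN =>
    if i < j then
      let k := PySem.Int.floordiv (i + j) 2
      if n < PySem.List.pyGetD result k 0 then
        let comps' := comps ++ [[n, PySem.List.pyGetD result k 0]]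
        let compsN' := compsN + 1
        let j' := k
        if i ≥ j' - 1 then (PySem.List.insert result j' n, comps', compsN')
        else pvWhileA n fuel result i j' comps' compsN'
      else
        let comps' := comps ++ [[n, PySem.List.pyGetD result k 0]]
        let compsN' := compsN + 1
        let i' := k
        if i' ≥ j - 1 then (PySem.List.insert result j n, comps', compsN')
        else pvWhileA n fuel result i' j comps' compsN'
    else (result, comps, compsN)

-- one iteration of 'for n in x'
def pvStepA (st : List Int × List (List Int) × Int) (n : Int) : List Int × List (List Int) × Int :=
  let result := st.1
  let comps := st.2.1
  let compsN := st.2.2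
  if result = [] then (result ++ [n], comps, compsN)
  else
    let i : Int := 0
    let j : Int := PySem.List.len result - 1
    if n > PySem.List.pyGetD result j 0 then
      (PySem.List.insert result (j + 1) n, comps ++ [[n, PySem.List.pyGetD result j 0]], compsN + 1)
    else if n < PySem.List.pyGetD result i 0 then
      (PySem.List.insert result i n, comps ++ [[n, PySem.List.pyGetD result i 0]], compsN + 1)
    else
      pvWhileA n (j - i + 1).toNat result i j
        (comps ++ [[n, PySem.List.pyGetD result i 0], [n, PySem.List.pyGetD result j 0]]) (compsN + 2)

def dict_sort_front (x : List Int) : List Int × List (List Int) × Int :=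
  x.foldl pvStepA ([], [], 0)

-- ===== PORT B =====
-- _select: value of the k-th element of the multiset, walking the counts with accumulator acc
def pvSelect : List (Int × Int) → Int → Int → Int
  | [], _, _ => 0
  | (v, c) :: rest, k, acc => if k < acc + c then v else pvSelect rest k (acc + c)

-- _add: one more copy of n, keys kept strictly increasing
def pvAdd : List (Int × Int) → Int → List (Int × Int)
  | [], n => [(n, 1)]
  | (v, c) :: rest, n =>
    if v < n then (v, c) :: pvAdd rest n
    else if v = n then (v, c + 1) :: rest
    else (n, 1) :: (v, c) :: rest

-- the inner 'while i < j' loop of B; state is (counts, size, i, j, comps, compsN)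
def pvWhileB (n : Int) : Nat → List (Int × Int) → Int → Int → Int → List (List Int) → Int →
    List (Int × Int) × Int × List (List Int) × Int
  | 0, counts, size, _, _, comps, compsN => (counts, size, comps, compsN)
  | fuel + 1, counts, size, i, j, comps, compsN =>
    if i < j then
      let k := PySem.Int.floordiv (i + j) 2
      let rk := pvSelect counts k 0
      let comps' := comps ++ [[n, rk]]
      let compsN' := compsN + 1
      if n < rk then
        let j' := k
        if i ≥ j' - 1 then (pvAdd counts n, size + 1, comps', compsN')
        else pvWhileB n fuel counts size i j' comps' compsN'
      else
        let i' := k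
        if i' ≥ j - 1 then (pvAdd counts n, size + 1, comps', compsN')
        else pvWhileB n fuel counts size i' j comps' compsN'
    else (counts, size, comps, compsN)

def pvStepB (st : List (Int × Int) × Int × List (List Int) × Int) (n : Int) :
    List (Int × Int) × Int × List (List Int) × Int :=
  let counts := st.1
  let size := st.2.1
  let comps := st.2.2.1
  let compsN := st.2.2.2
  if size = 0 then (pvAdd counts n, 1, comps, compsN)
  else
    let i : Int := 0
    let j : Int := size - 1
    let first := pvSelect counts 0 0
    let last := pvSelect counts j 0
    if n > last then (pvAdd counts n, size + 1, comps ++ [[n, last]], compsN + 1)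
    else if n < first then (pvAdd counts n, size + 1, comps ++ [[n, first]], compsN + 1)
    else
      pvWhileB n (j - i + 1).toNat counts size i j
        (comps ++ [[n, first], [n, last]]) (compsN + 2)

-- final 'result.extend([v] * c)' loop
def pvExpand (counts : List (Int × Int)) : List Int :=
  counts.foldl (fun acc p => acc ++ List.replicate p.2.toNat p.1) []

def dict_sort_front_alt (x : List Int) : List Int × List (List Int) × Int :=
  let st := x.foldl pvStepB ([], 0, [], 0)
  (pvExpand st.1, st.2.2.1, st.2.2.2)

-- ===== PRECONDITION & SPEC =====
def Spec_dict_sort_front (x : List Int) (out : List Int × List (List Int) × Int) : Prop := out = dict_sort_front_alt x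
instance (x : List Int) (out : List Int × List (List Int) × Int) : Decidable (Spec_dict_sort_front x out) := by unfold Spec_dict_sort_front; infer_instance

-- ===== CLAIM (what is proved, stated in full; the proofs are below) =====
def Claim_equal_dict_sort_front : Prop := ∀ (x : List Int), Dom_dict_sort_front x → Spec_dict_sort_front x (dict_sort_front x)

-- ===== LEMMAS AND PROOFS =====

-- the multiset held by a count list, as a flat sorted list
def pvFlat (counts : List (Int × Int)) : List Int :=
  counts.flatMap (fun p => List.replicate p.2.toNat p.1)

-- well-formedness of a count list: strictly increasing keys, positive counts
def CountsOk (counts : List (Int × Int)) : Prop :=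
  counts.Pairwise (fun p q => p.1 < q.1) ∧ ∀ p ∈ counts, 0 < p.2

lemma pvExpand_eq_flat (counts : List (Int × Int)) : pvExpand counts = pvFlat counts := by
  simpa [pvExpand, pvFlat] using
    PySem.List.foldl_append_eq_flatMap (fun p : Int × Int => List.replicate p.2.toNat p.1) counts []

lemma pvSelect_eq (counts : List (Int × Int)) (hpos : ∀ p ∈ counts, 0 < p.2) :
    ∀ (k acc : Int), acc ≤ k → k - acc < ((pvFlat counts).length : Int) →
      pvSelect counts k acc = (pvFlat counts).getD (k - acc).toNat 0 := by
  induction counts with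
  | nil => intro k acc _ h2; simp [pvFlat] at h2; omega
  | cons p rest ih =>
    intro k acc h1 h2
    obtain ⟨v, c⟩ := p
    have hc : 0 < c := hpos (v, c) (by simp)
    have hrest : ∀ q ∈ rest, 0 < q.2 := fun q hq => hpos q (by simp [hq])
    simp only [pvFlat, List.flatMap_cons] at h2 ⊢
    by_cases hk : k < acc + c
    · have hlt : (k - acc).toNat < c.toNat := by omega
      simp only [pvSelect, if_pos hk]
      rw [List.getD_append _ _ _ _ (by simpa using hlt)]
      rw [List.getD_eq_getElem _ 0 (by simpa using hlt)]
      simp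
    · simp only [pvSelect, if_neg hk]
      have := ih hrest k (acc + c) (by omega)
        (by simp only [pvFlat]; rw [List.length_append, List.length_replicate] at h2; push_cast at h2 ⊢; omega)
      rw [this]
      rw [List.getD_append_right _ _ _ _ (by simp; omega)]
      congr 1
      simp only [List.length_replicate]
      omega

lemma pvAdd_mem (n : Int) : ∀ (l : List (Int × Int)) (q : Int × Int), q ∈ pvAdd l n → q.1 = n ∨ q ∈ l := by
  intro l
  induction l with
  | nil => intro q hq; simp [pvAdd] at hq; subst hq; simp
  | cons p rest ih =>
    intro q hq
    obtain ⟨v, c⟩ := p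
    simp only [pvAdd] at hq
    split_ifs at hq with h1 h2
    · rcases List.mem_cons.mp hq with h | h
      · subst h; simp
      · rcases ih q h with h | h
        · exact Or.inl h
        · exact Or.inr (by simp [h])
    · rcases List.mem_cons.mp hq with h | h
      · subst h; subst h2; simp
      · exact Or.inr (by simp [h])
    · rcases List.mem_cons.mp hq with h | h
      · subst h; simp
      · exact Or.inr h

lemma oi_replicate (n v : Int) (h : v < n) (l : List Int) (m : Nat) :
    List.orderedInsert (· ≤ ·) n (List.replicate m v ++ l) =
      List.replicate m v ++ List.orderedInsert (· ≤ ·) n l := by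
  induction m with
  | zero => simp
  | succ m ih =>
    rw [List.replicate_succ, List.cons_append, List.orderedInsert_cons, if_neg (by omega),
      ih, List.cons_append]

lemma pvAdd_flat (counts : List (Int × Int)) (n : Int) (hOk : CountsOk counts) :
    pvFlat (pvAdd counts n) = List.orderedInsert (· ≤ ·) n (pvFlat counts) := by
  induction counts with
  | nil => simp [pvAdd, pvFlat]
  | cons p rest ih =>
    obtain ⟨v, c⟩ := p
    obtain ⟨hpw, hpos⟩ := hOk
    have hc : 0 < c := hpos (v, c) (by simp)
    have hOk' : CountsOk rest := ⟨hpw.of_cons, fun q hq => hpos q (by simp [hq])⟩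
    simp only [pvAdd]
    split_ifs with h1 h2
    · simp only [pvFlat, List.flatMap_cons] at *
      rw [ih hOk', oi_replicate n v h1]
    · subst h2
      simp only [pvFlat, List.flatMap_cons]
      obtain ⟨m, hm⟩ : ∃ m, c.toNat = m + 1 := ⟨c.toNat - 1, by omega⟩
      have hm1 : (c + 1).toNat = c.toNat + 1 := by omega
      rw [hm1, hm, List.replicate_succ, List.replicate_succ, List.cons_append, List.cons_append,
        List.orderedInsert_cons, if_pos (le_refl v)]
    · have hnv : n < v := by omega
      simp only [pvFlat, List.flatMap_cons]
      obtain ⟨m, hm⟩ : ∃ m, c.toNat = m + 1 := ⟨c.toNat - 1, by omega⟩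
      rw [hm, List.replicate_succ, List.cons_append, List.orderedInsert_cons, if_pos (le_of_lt hnv)]
      simp

lemma pvAdd_ok (counts : List (Int × Int)) (n : Int) (hOk : CountsOk counts) :
    CountsOk (pvAdd counts n) := by
  induction counts with
  | nil => exact ⟨List.pairwise_singleton _ _, by simp [pvAdd]⟩
  | cons p rest ih =>
    obtain ⟨v, c⟩ := p
    obtain ⟨hpw, hpos⟩ := hOk
    have hc : 0 < c := hpos (v, c) (by simp)
    have hhead : ∀ q ∈ rest, v < q.1 := fun q hq => (List.pairwise_cons.mp hpw).1 q hq
    have hOk' : CountsOk rest := ⟨hpw.of_cons, fun q hq => hpos q (by simp [hq])⟩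
    simp only [pvAdd]
    split_ifs with h1 h2
    · obtain ⟨hpw', hpos'⟩ := ih hOk'
      refine ⟨List.pairwise_cons.mpr ⟨?_, hpw'⟩, ?_⟩
      · intro q hq
        rcases pvAdd_mem n rest q hq with h | h
        · simpa [h] using h1
        · exact hhead q h
      · intro q hq
        rcases List.mem_cons.mp hq with h | h
        · simp [h, hc]
        · exact hpos' q h
    · subst h2
      refine ⟨List.pairwise_cons.mpr ⟨hhead, hpw.of_cons⟩, ?_⟩
      intro q hq
      rcases List.mem_cons.mp hq with h | h
      · simp [h]; omega
      · exact hpos q (by simp [h])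
    · have hnv : n < v := by omega
      refine ⟨List.pairwise_cons.mpr ⟨?_, hpw⟩, ?_⟩
      · intro q hq
        rcases List.mem_cons.mp hq with h | h
        · simp [h, hnv]
        · exact lt_trans hnv (hhead q h)
      · intro q hq
        rcases List.mem_cons.mp hq with h | h
        · simp [h]
        · exact hpos q h

lemma sorted_getD_mono (l : List Int) (hs : l.Pairwise (· ≤ ·)) (a b : Nat)
    (hab : a ≤ b) (hb : b < l.length) : l.getD a 0 ≤ l.getD b 0 := by
  have ha : a < l.length := lt_of_le_of_lt hab hb
  rw [List.getD_eq_getElem l 0 ha, List.getD_eq_getElem l 0 hb]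
  rcases lt_or_eq_of_le hab with h | h
  · exact (List.pairwise_iff_getElem.mp hs) a b ha hb h
  · subst h; exact le_refl _

lemma insert_front_all_eq (n : Int) : ∀ (t : List Int) (p : Nat), p ≤ t.length →
    (∀ m < p, t.getD m 0 = n) → t.take p ++ n :: t.drop p = n :: t := by
  intro t
  induction t with
  | nil =>
    intro p hp _
    have : p = 0 := by simpa using hp
    subst this; simp
  | cons b u ih =>
    intro p hp hall
    match p with
    | 0 => simp
    | m + 1 =>
      have hb : b = n := by simpa using hall 0 (by omega)
      simp only [List.take_succ_cons, List.drop_succ_cons, List.cons_append]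
      rw [ih m (by simp at hp; omega) (fun m' hm' => by simpa using hall (m' + 1) (by omega)), hb]

-- inserting n at any correct position of a sorted list is orderedInsert
lemma insert_eq_orderedInsert (n : Int) :
    ∀ (l : List Int) (p : Nat), l.Pairwise (· ≤ ·) → p ≤ l.length →
      (∀ m < p, l.getD m 0 ≤ n) → (p = l.length ∨ n ≤ l.getD p 0) →
      l.take p ++ n :: l.drop p = List.orderedInsert (· ≤ ·) n l := by
  intro l
  induction l with
  | nil =>
    intro p _ hp _ _
    have : p = 0 := by simpa using hp
    subst this; simp
  | cons b t ih =>
    intro p hs hp hpre hpost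
    match p with
    | 0 =>
      have hnb : n ≤ b := by
        rcases hpost with h | h
        · simp at h
        · simpa using h
      simp [List.orderedInsert_cons, if_pos hnb]
    | m + 1 =>
      have hb : b ≤ n := by simpa using hpre 0 (by omega)
      have htail : ∀ y ∈ t, b ≤ y := (List.pairwise_cons.mp hs).1
      by_cases hnb : n ≤ b
      · have hbn : b = n := le_antisymm hb hnb
        have hall : ∀ m' < m, t.getD m' 0 = n := by
          intro m' hm'
          have h1 : t.getD m' 0 ≤ n := by simpa using hpre (m' + 1) (by omega)
          have hlen : m' < t.length := by simp at hp; omega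
          have h2 : n ≤ t.getD m' 0 := by
            rw [List.getD_eq_getElem t 0 hlen]
            exact hbn ▸ htail _ (List.getElem_mem hlen)
          omega
        rw [List.orderedInsert_cons, if_pos hnb]
        simp only [List.take_succ_cons, List.drop_succ_cons, List.cons_append]
        rw [insert_front_all_eq n t m (by simp at hp; omega) hall, hbn]
      · rw [List.orderedInsert_cons, if_neg hnb]
        simp only [List.take_succ_cons, List.drop_succ_cons, List.cons_append]
        congr 1
        refine ih m hs.of_cons (by simp at hp; omega) ?_ ?_
        · intro m' hm'; simpa using hpre (m' + 1) (by omega)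
        · rcases hpost with h | h
          · left; simp at h; omega
          · right; simpa using h

-- the correspondence between an A-state and a B-state
def InvSt (a : List Int × List (List Int) × Int) (b : List (Int × Int) × Int × List (List Int) × Int) : Prop :=
  CountsOk b.1 ∧ pvFlat b.1 = a.1 ∧ b.2.1 = (a.1.length : Int) ∧ a.1.Pairwise (· ≤ ·) ∧
    b.2.2.1 = a.2.1 ∧ b.2.2.2 = a.2.2

-- the insert/add case: both sides extend the multiset by n, at a correct position
lemma insert_add_inv (counts : List (Int × Int)) (result : List Int) (n : Int) (p : Int)
    (comps : List (List Int)) (compsN : Int)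
    (hOk : CountsOk counts) (hf : pvFlat counts = result) (hs : result.Pairwise (· ≤ ·))
    (hp0 : 0 ≤ p) (hple : p.toNat ≤ result.length)
    (hpre : ∀ m < p.toNat, result.getD m 0 ≤ n)
    (hpost : p.toNat = result.length ∨ n ≤ result.getD p.toNat 0) :
    InvSt (PySem.List.insert result p n, comps, compsN)
          (pvAdd counts n, (result.length : Int) + 1, comps, compsN) := by
  have hins : PySem.List.insert result p n = List.orderedInsert (· ≤ ·) n result := by
    rw [show p = ((p.toNat : Nat) : Int) from (Int.toNat_of_nonneg hp0).symm,
      PySem.List.insert_natCast result p.toNat n hple]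
    exact insert_eq_orderedInsert n result p.toNat hs hple hpre hpost
  refine ⟨pvAdd_ok counts n hOk, ?_, ?_, ?_, rfl, rfl⟩
  · rw [pvAdd_flat counts n hOk, hf, hins]
  · simp only [hins, List.orderedInsert_length]
    push_cast; ring
  · simp only [hins]
    exact List.Pairwise.orderedInsert n result hs

lemma while_eq (n : Int) (counts : List (Int × Int)) (result : List Int)
    (hOk : CountsOk counts) (hf : pvFlat counts = result) (hs : result.Pairwise (· ≤ ·)) :
    ∀ (fuel : Nat) (i j : Int) (comps : List (List Int)) (compsN : Int),
    0 ≤ i → i ≤ j → j < (result.length : Int) →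
    result.getD i.toNat 0 ≤ n → n ≤ result.getD j.toNat 0 →
    InvSt (pvWhileA n fuel result i j comps compsN)
          (pvWhileB n fuel counts (result.length : Int) i j comps compsN) := by
  have hpos : ∀ p ∈ counts, 0 < p.2 := hOk.2
  intro fuel
  induction fuel with
  | zero =>
    intro i j comps compsN _ _ _ _ _
    exact ⟨hOk, hf, rfl, hs, rfl, rfl⟩
  | succ fuel ih =>
    intro i j comps compsN hi0 hij hjlen hiL hjR
    by_cases hij' : i < j
    · have hk0 : 0 ≤ PySem.Int.floordiv (i + j) 2 := by
        have := (PySem.Int.floordiv_two_mid_bounds (le_of_lt hij')).1; omega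
      have hki : i ≤ PySem.Int.floordiv (i + j) 2 :=
        (PySem.Int.floordiv_two_mid_bounds (le_of_lt hij')).1
      have hkj : PySem.Int.floordiv (i + j) 2 < j := by
        rw [PySem.Int.floordiv_lt_iff_lt_mul (by omega : (0:Int) < 2)]; omega
      set k := PySem.Int.floordiv (i + j) 2 with hkdef
      have hklen : (k.toNat : Int) < (result.length : Int) := by omega
      have hget : PySem.List.pyGetD result k 0 = result.getD k.toNat 0 := by
        rw [PySem.List.pyGetD_eq_getElem result 0 hk0 (by omega),
          List.getD_eq_getElem result 0 (by omega)]
      have hsel : pvSelect counts k 0 = result.getD k.toNat 0 := by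
        rw [pvSelect_eq counts hpos k 0 (by omega) (by rw [hf]; omega), hf]
        norm_num
      simp only [pvWhileA, pvWhileB, if_pos hij', hget, hsel, ← hkdef]
      by_cases hlt : n < result.getD k.toNat 0
      · simp only [if_pos hlt]
        by_cases hbrk : i ≥ k - 1
        · simp only [if_pos hbrk]
          have hik : i < k := by
            rcases lt_or_eq_of_le hki with h | h
            · exact h
            · exfalso; rw [← h] at hlt; omega
          refine insert_add_inv counts result n k _ _ hOk hf hs hk0 (by omega) ?_ ?_
          · intro m hm
            have hmi : m ≤ i.toNat := by omega
            calc result.getD m 0 ≤ result.getD i.toNat 0 :=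
                  sorted_getD_mono result hs m i.toNat hmi (by omega)
              _ ≤ n := hiL
          · right
            exact le_of_lt hlt
        · simp only [if_neg hbrk]
          exact ih i k _ _ hi0 (by omega) (by omega) hiL (le_of_lt hlt)
      · simp only [if_neg hlt]
        by_cases hbrk : k ≥ j - 1
        · simp only [if_pos hbrk]
          refine insert_add_inv counts result n j _ _ hOk hf hs (by omega) (by omega) ?_ ?_
          · intro m hm
            have hmk : m ≤ k.toNat := by omega
            calc result.getD m 0 ≤ result.getD k.toNat 0 :=
                  sorted_getD_mono result hs m k.toNat hmk (by omega)
              _ ≤ n := by omega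
          · right; exact hjR
        · simp only [if_neg hbrk]
          exact ih k j _ _ (by omega) (le_of_lt hkj) hjlen (by omega) hjR
    · simp only [pvWhileA, pvWhileB, if_neg hij']
      exact ⟨hOk, hf, rfl, hs, rfl, rfl⟩

lemma step_eq (a : List Int × List (List Int) × Int) (b : List (Int × Int) × Int × List (List Int) × Int)
    (n : Int) (h : InvSt a b) : InvSt (pvStepA a n) (pvStepB b n) := by
  obtain ⟨result, comps, compsN⟩ := a
  obtain ⟨counts, size, comps2, compsN2⟩ := b
  obtain ⟨hOk, hf, hlen, hs, hc, hN⟩ := h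
  simp only at hOk hf hlen hs hc hN
  subst hc hN hlen
  simp only [pvStepA, pvStepB]
  by_cases hemp : result = []
  · have hsz : (result.length : Int) = 0 := by simp [hemp]
    simp only [if_pos hemp, if_pos hsz]
    refine ⟨pvAdd_ok counts n hOk, ?_, ?_, ?_, rfl, rfl⟩
    · rw [pvAdd_flat counts n hOk, hf, hemp]; simp
    · simp [hemp]
    · subst hemp; simp
  · have hlen1 : 1 ≤ result.length := by
      cases result with
      | nil => exact absurd rfl hemp
      | cons a l => simp
    have hsz : ¬ (result.length : Int) = 0 := by
      intro h; apply hemp; simpa using h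
    simp only [if_neg hemp, if_neg hsz, PySem.List.len_eq]
    have hj0 : (0 : Int) ≤ (result.length : Int) - 1 := by omega
    have hjT : ((result.length : Int) - 1).toNat = result.length - 1 := by omega
    have hlast : PySem.List.pyGetD result ((result.length : Int) - 1) 0 =
        result.getD (result.length - 1) 0 := by
      rw [PySem.List.pyGetD_eq_getElem result 0 hj0 (by omega),
        List.getD_eq_getElem result 0 (by omega)]
      congr 1
    have hfirst : PySem.List.pyGetD result 0 0 = result.getD 0 0 :=
      PySem.List.pyGetD_zero result 0
    have hselL : pvSelect counts ((result.length : Int) - 1) 0 = result.getD (result.length - 1) 0 := by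
      rw [pvSelect_eq counts hOk.2 _ 0 (by omega) (by rw [hf]; omega), hf]
      norm_num [hjT]
    have hselF : pvSelect counts 0 0 = result.getD 0 0 := by
      rw [pvSelect_eq counts hOk.2 0 0 (by omega) (by rw [hf]; omega), hf]
      norm_num
    simp only [hlast, hfirst, hselL, hselF]
    by_cases hgt : n > result.getD (result.length - 1) 0
    · simp only [if_pos hgt]
      have := insert_add_inv counts result n ((result.length : Int) - 1 + 1)
        (comps2 ++ [[n, result.getD (result.length - 1) 0]]) (compsN2 + 1)
        hOk hf hs (by omega) (by omega) ?_ ?_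
      · exact this
      · intro m hm
        have : m ≤ result.length - 1 := by omega
        calc result.getD m 0 ≤ result.getD (result.length - 1) 0 :=
              sorted_getD_mono result hs m (result.length - 1) this (by omega)
          _ ≤ n := le_of_lt hgt
      · left; omega
    · simp only [if_neg hgt]
      by_cases hlt : n < result.getD 0 0
      · simp only [if_pos hlt]
        have := insert_add_inv counts result n 0
          (comps2 ++ [[n, result.getD 0 0]]) (compsN2 + 1)
          hOk hf hs le_rfl (by omega) (by omega) ?_
        · exact this
        · right
          simpa using le_of_lt hlt
      · simp only [if_neg hlt]
        exact while_eq n counts result hOk hf hs _ 0 ((result.length : Int) - 1) _ _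
          le_rfl (by omega) (by omega) (by simpa using not_lt.mp hlt)
          (by rw [hjT]; exact not_lt.mp hgt)

lemma fold_eq (x : List Int) :
    ∀ (a : List Int × List (List Int) × Int) (b : List (Int × Int) × Int × List (List Int) × Int),
      InvSt a b → InvSt (x.foldl pvStepA a) (x.foldl pvStepB b) := by
  intro a b h
  induction x generalizing a b with
  | nil => simpa using h
  | cons y ys ih => exact ih _ _ (step_eq a b y h)

-- ===== VERDICT (by name: the statement is the Claim_ definition above) =====
theorem dict_sort_front_spec : Claim_equal_dict_sort_front := by
  intro x _
  unfold Spec_dict_sort_front dict_sort_front dict_sort_front_alt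
  have h := fold_eq x ([], [], 0) ([], 0, [], 0) (by simp [InvSt, CountsOk, pvFlat])
  obtain ⟨-, h1, -, -, h3, h4⟩ := h
  simp only [pvExpand_eq_flat]
  rw [h1, h3, h4]
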